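-- pv_equiv track=rewrite | github.com/visaev-dn/SD_DNAAS_v1 | config_engine/configuration_diff_engine.py | _find_affected_interfaces
-- ===== SOURCE A (Python) =====
-- from typing import Dict, List, Optional, Any, Tuple
--
-- def _find_affected_interfaces(current_device: Dict, new_device: Dict) -> List[str]:
--     """Find interfaces that are affected by changes."""
--     affected = set()
--
--     # Check for interface changes
--     current_interfaces = set(current_device['interfaces'].keys())
--     new_interfaces = set(new_device['interfaces'].keys())
--
--     # Added interfaces
--     affected.update(new_interfaces - current_interfaces)
--
--     # Removed interfaces
--     affected.update(current_interfaces - new_interfaces)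
--
--     # Modified interfaces
--     common_interfaces = current_interfaces & new_interfaces
--     for interface in common_interfaces:
--         if (current_device['interfaces'][interface] !=
--             new_device['interfaces'][interface]):
--             affected.add(interface)
--
--     return list(affected)
-- ===== SOURCE B (Python) =====
-- def _find_affected_interfaces(current_device, new_device):
--     """Find affected interfaces by a two-pointer merge of the two sorted key lists."""
--     cur = current_device['interfaces']
--     new = new_device['interfaces']
--     ck, nk = sorted(cur), sorted(new)
--     out = []
--     i = j = 0
--     while i < len(ck) and j < len(nk):
--         a, b = ck[i], nk[j]
--         if a < b:
--             out.append(a)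
--             i += 1
--         elif b < a:
--             out.append(b)
--             j += 1
--         else:
--             if cur[a] != new[a]:
--                 out.append(a)
--             i += 1
--             j += 1
--     out += ck[i:] + nk[j:]
--     return out
-- ===== Notes on version B (the rewrite author's own statement) =====
-- stated objective: alternative
-- what changed: Replaces A's hash-set machinery (two set differences plus a loop over the intersection) with a two-pointer merge of the two sorted key lists that classifies each key as added/removed/possibly-modified during the merge, with no set operations; the result is the same set of keys (A in unspecified set order, B sorted).
import Mathlib
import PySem

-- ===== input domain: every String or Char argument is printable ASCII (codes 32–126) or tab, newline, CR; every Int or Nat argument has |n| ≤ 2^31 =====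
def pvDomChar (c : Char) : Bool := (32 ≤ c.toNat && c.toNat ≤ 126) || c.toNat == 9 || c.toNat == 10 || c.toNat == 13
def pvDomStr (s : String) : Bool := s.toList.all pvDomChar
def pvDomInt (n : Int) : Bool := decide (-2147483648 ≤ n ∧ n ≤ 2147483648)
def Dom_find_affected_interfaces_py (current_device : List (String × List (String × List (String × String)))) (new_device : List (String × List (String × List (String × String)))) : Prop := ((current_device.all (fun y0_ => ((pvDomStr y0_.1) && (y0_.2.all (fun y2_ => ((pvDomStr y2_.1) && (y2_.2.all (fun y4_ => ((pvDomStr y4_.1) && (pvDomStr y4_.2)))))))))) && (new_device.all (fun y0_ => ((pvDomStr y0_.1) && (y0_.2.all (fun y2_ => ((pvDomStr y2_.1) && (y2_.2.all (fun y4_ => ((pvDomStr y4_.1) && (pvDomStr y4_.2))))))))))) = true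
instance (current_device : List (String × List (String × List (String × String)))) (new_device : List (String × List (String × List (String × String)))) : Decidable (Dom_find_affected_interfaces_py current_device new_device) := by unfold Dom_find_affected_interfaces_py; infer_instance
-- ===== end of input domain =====

-- B replaces A's hash-set machinery (two set differences plus a loop over the intersection) by a
-- two-pointer merge of the two sorted key lists, classifying each key during the merge; outputs
-- are compared as sets (Python's set iteration order is unspecified), so A's port returns the
-- canonical sorted enumeration of its affected-key set.

-- ===== PORT A =====
-- Python's '==' on dict[str, str]: same key set and the same value at every key (A-side copy).
def pyDictEqA (d e : List (String × String)) : Bool :=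
  PySem.Set.equal (PySem.Set.ofList (d.map Prod.fst)) (PySem.Set.ofList (e.map Prod.fst))
    && (d.map Prod.fst).all (fun k => PySem.Dict.get? ⟨d⟩ k == PySem.Dict.get? ⟨e⟩ k)

def find_affected_interfaces_py (current_device : List (String × List (String × List (String × String)))) (new_device : List (String × List (String × List (String × String)))) : List String :=
  match PySem.Dict.get? ⟨current_device⟩ "interfaces", PySem.Dict.get? ⟨new_device⟩ "interfaces" with
  | some cur, some nw =>
    let current_interfaces := PySem.Set.ofList (PySem.Dict.keys ⟨cur⟩)
    let new_interfaces := PySem.Set.ofList (PySem.Dict.keys ⟨nw⟩)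
    let affected : PySem.Set String := PySem.Set.empty
    let affected := PySem.Set.update affected (PySem.Set.diff new_interfaces current_interfaces)
    let affected := PySem.Set.update affected (PySem.Set.diff current_interfaces new_interfaces)
    let common_interfaces := PySem.Set.inter current_interfaces new_interfaces
    let affected := common_interfaces.foldl
      (fun s interface =>
        if !pyDictEqA (PySem.Dict.getD ⟨cur⟩ interface []) (PySem.Dict.getD ⟨nw⟩ interface [])
        then PySem.Set.add s interface else s) affected
    -- list(affected): the set's iteration order is unmodelled; canonical sorted enumeration
    PySem.List.sorted affected (fun x => x) false
  | _, _ => []  -- KeyError: excluded by Pre_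

-- ===== PORT B =====
-- Python's '==' on dict[str, str]: same key set and the same value at every key (B-side copy).
def pyDictEqB (d e : List (String × String)) : Bool :=
  PySem.Set.equal (PySem.Set.ofList (d.map Prod.fst)) (PySem.Set.ofList (e.map Prod.fst))
    && (d.map Prod.fst).all (fun k => PySem.Dict.get? ⟨d⟩ k == PySem.Dict.get? ⟨e⟩ k)

-- the while loop of Source B: two pointers over the two sorted key lists (tails = ck[i:], nk[j:]);
-- the trailing 'out += ck[i:] + nk[j:]' is the two base cases
def mergeAff (cur nw : PySem.Dict String (List (String × String))) : List String → List String → List String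
  | [], js => js
  | i :: is, [] => i :: is
  | i :: is, j :: js =>
    if i < j then i :: mergeAff cur nw is (j :: js)
    else if j < i then j :: mergeAff cur nw (i :: is) js
    else if pyDictEqB (PySem.Dict.getD cur i []) (PySem.Dict.getD nw i []) then
      mergeAff cur nw is js
    else i :: mergeAff cur nw is js
termination_by is js => is.length + js.length

def find_affected_interfaces_py_alt (current_device : List (String × List (String × List (String × String)))) (new_device : List (String × List (String × List (String × String)))) : List String :=
  -- cur = current_device['interfaces']; new = new_device['interfaces'] (KeyError → excluded by Pre_)
  (PySem.Dict.get? ⟨current_device⟩ "interfaces").elim [] fun cur =>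
    (PySem.Dict.get? ⟨new_device⟩ "interfaces").elim [] fun nw =>
      mergeAff ⟨cur⟩ ⟨nw⟩
        (PySem.List.sorted (PySem.Set.ofList (PySem.Dict.keys ⟨cur⟩)) (fun x => x) false)
        (PySem.List.sorted (PySem.Set.ofList (PySem.Dict.keys ⟨nw⟩)) (fun x => x) false)

-- ===== PRECONDITION & SPEC =====
-- A (and B) raise KeyError unless both devices carry the key 'interfaces'.
def Pre_find_affected_interfaces_py (current_device : List (String × List (String × List (String × String)))) (new_device : List (String × List (String × List (String × String)))) : Prop :=
  PySem.Dict.contains ⟨current_device⟩ "interfaces" = true ∧ PySem.Dict.contains ⟨new_device⟩ "interfaces" = true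
instance (current_device : List (String × List (String × List (String × String)))) (new_device : List (String × List (String × List (String × String)))) : Decidable (Pre_find_affected_interfaces_py current_device new_device) := by unfold Pre_find_affected_interfaces_py; infer_instance
def pvWitness_find_affected_interfaces_py : (List (String × List (String × List (String × String)))) × (List (String × List (String × List (String × String)))) :=
  ([("interfaces", [("eth0", [("mtu", "1500")])])], [("interfaces", [("eth0", [("mtu", "9000")])])])

def Spec_find_affected_interfaces_py (current_device : List (String × List (String × List (String × String)))) (new_device : List (String × List (String × List (String × String)))) (out : List String) : Prop := out = find_affected_interfaces_py_alt current_device new_device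
instance (current_device : List (String × List (String × List (String × String)))) (new_device : List (String × List (String × List (String × String)))) (out : List String) : Decidable (Spec_find_affected_interfaces_py current_device new_device out) := by unfold Spec_find_affected_interfaces_py; infer_instance

-- ===== CLAIM (what is proved, stated in full; the proofs are below) =====
def Claim_equal_find_affected_interfaces_py : Prop := ∀ (current_device : List (String × List (String × List (String × String)))) (new_device : List (String × List (String × List (String × String)))), Dom_find_affected_interfaces_py current_device new_device → Pre_find_affected_interfaces_py current_device new_device → Spec_find_affected_interfaces_py current_device new_device (find_affected_interfaces_py current_device new_device)

-- ===== LEMMAS AND PROOFS =====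

theorem pyDictEqA_eq_pyDictEqB : pyDictEqA = pyDictEqB := rfl

-- membership in A's "compare the common keys" loop
theorem mem_foldl_addif {α : Type} [BEq α] [LawfulBEq α] (l : List α) (p : α → Bool) (s0 : PySem.Set α) (x : α) :
    x ∈ l.foldl (fun s k => if p k then PySem.Set.add s k else s) s0 ↔ x ∈ s0 ∨ (x ∈ l ∧ p x = true) := by
  induction l generalizing s0 with
  | nil => simp
  | cons a t ih =>
    simp only [List.foldl_cons, List.mem_cons]
    by_cases hpa : p a = true
    · rw [if_pos hpa, ih]
      simp only [PySem.Set.mem_add]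
      constructor
      · rintro (⟨h | rfl⟩ | ⟨h1, h2⟩)
        · exact Or.inl h
        · exact Or.inr ⟨Or.inl rfl, hpa⟩
        · exact Or.inr ⟨Or.inr h1, h2⟩
      · rintro (h | ⟨rfl | h1, h2⟩)
        · exact Or.inl (Or.inl h)
        · exact Or.inl (Or.inr rfl)
        · exact Or.inr ⟨h1, h2⟩
    · rw [if_neg hpa, ih]
      constructor
      · rintro (h | ⟨h1, h2⟩)
        · exact Or.inl h
        · exact Or.inr ⟨Or.inr h1, h2⟩
      · rintro (h | ⟨rfl | h1, h2⟩)
        · exact Or.inl h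
        · exact absurd h2 hpa
        · exact Or.inr ⟨h1, h2⟩

theorem nodup_foldl_addif {α : Type} [BEq α] [LawfulBEq α] (l : List α) (p : α → Bool) (s0 : PySem.Set α) (h : s0.Nodup) :
    (l.foldl (fun s k => if p k then PySem.Set.add s k else s) s0).Nodup := by
  induction l generalizing s0 with
  | nil => exact h
  | cons a t ih =>
    simp only [List.foldl_cons]
    split
    · exact ih _ (PySem.Set.nodup_add _ _ h)
    · exact ih _ h

-- every element of the merge comes from one of the two lists
theorem mem_mergeAff_sub (cur nw : PySem.Dict String (List (String × String))) (is js : List String) (x : String)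
    (h : x ∈ mergeAff cur nw is js) : x ∈ is ∨ x ∈ js := by
  fun_induction mergeAff cur nw is js with
  | case1 js => exact Or.inr h
  | case2 i is => exact Or.inl h
  | case3 i is j js hij ih =>
    rcases List.mem_cons.mp h with rfl | h'
    · exact Or.inl (List.mem_cons_self)
    · rcases ih h' with h1 | h1
      · exact Or.inl (List.mem_cons_of_mem _ h1)
      · exact Or.inr h1
  | case4 i is j js hij hji ih =>
    rcases List.mem_cons.mp h with rfl | h'
    · exact Or.inr (List.mem_cons_self)
    · rcases ih h' with h1 | h1
      · exact Or.inl h1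
      · exact Or.inr (List.mem_cons_of_mem _ h1)
  | case5 i is j js hij hji heq ih =>
    rcases ih h with h1 | h1
    · exact Or.inl (List.mem_cons_of_mem _ h1)
    · exact Or.inr (List.mem_cons_of_mem _ h1)
  | case6 i is j js hij hji heq ih =>
    rcases List.mem_cons.mp h with rfl | h'
    · exact Or.inl (List.mem_cons_self)
    · rcases ih h' with h1 | h1
      · exact Or.inl (List.mem_cons_of_mem _ h1)
      · exact Or.inr (List.mem_cons_of_mem _ h1)

-- membership characterisation of the merge, on strictly sorted inputs
theorem mem_mergeAff (cur nw : PySem.Dict String (List (String × String))) (is js : List String) (x : String) :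
    is.Pairwise (· < ·) → js.Pairwise (· < ·) →
    (x ∈ mergeAff cur nw is js ↔
      (x ∈ is ∧ x ∉ js) ∨ (x ∈ js ∧ x ∉ is) ∨
      (x ∈ is ∧ x ∈ js ∧ pyDictEqB (PySem.Dict.getD cur x []) (PySem.Dict.getD nw x []) = false)) := by
  fun_induction mergeAff cur nw is js with
  | case1 js => intro _ _; simp
  | case2 i is => intro _ _; simp
  | case3 i is j js hij ih =>
    intro his hjs
    have his' := List.pairwise_cons.mp his
    have hinj : i ∉ j :: js := by
      intro hmem
      rcases List.mem_cons.mp hmem with rfl | hm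
      · exact lt_irrefl i hij
      · exact lt_irrefl i (lt_trans hij ((List.pairwise_cons.mp hjs).1 _ hm))
    by_cases hx : x = i
    · subst hx
      constructor
      · intro _; exact Or.inl ⟨List.mem_cons_self, hinj⟩
      · intro _; exact List.mem_cons_self
    · have hxis : x ∈ i :: is ↔ x ∈ is := by simp [hx]
      rw [List.mem_cons, or_iff_right hx, ih his'.2 hjs, hxis]
  | case4 i is j js hij hji ih =>
    intro his hjs
    have hjs' := List.pairwise_cons.mp hjs
    have hjni : j ∉ i :: is := by
      intro hmem
      rcases List.mem_cons.mp hmem with rfl | hm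
      · exact lt_irrefl j hji
      · exact lt_irrefl j (lt_trans hji ((List.pairwise_cons.mp his).1 _ hm))
    by_cases hx : x = j
    · subst hx
      constructor
      · intro _; exact Or.inr (Or.inl ⟨List.mem_cons_self, hjni⟩)
      · intro _; exact List.mem_cons_self
    · have hxjs : x ∈ j :: js ↔ x ∈ js := by simp [hx]
      rw [List.mem_cons, or_iff_right hx, ih his hjs'.2, hxjs]
  | case5 i is j js hij hji heq ih =>
    intro his hjs
    obtain rfl : j = i := le_antisymm (not_lt.mp hij) (not_lt.mp hji)
    have his' := List.pairwise_cons.mp his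
    have hjs' := List.pairwise_cons.mp hjs
    have hinis : j ∉ is := fun hm => lt_irrefl j (his'.1 _ hm)
    have hinjs : j ∉ js := fun hm => lt_irrefl j (hjs'.1 _ hm)
    rw [ih his'.2 hjs'.2]
    by_cases hx : x = j
    · subst hx
      simp [hinis, hinjs, heq]
    · simp [hx]
  | case6 i is j js hij hji heq ih =>
    intro his hjs
    obtain rfl : j = i := le_antisymm (not_lt.mp hij) (not_lt.mp hji)
    have his' := List.pairwise_cons.mp his
    have hjs' := List.pairwise_cons.mp hjs
    have heq' : pyDictEqB (PySem.Dict.getD cur j []) (PySem.Dict.getD nw j []) = false := by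
      simpa using heq
    by_cases hx : x = j
    · subst hx
      constructor
      · intro _
        exact Or.inr (Or.inr ⟨List.mem_cons_self, List.mem_cons_self, heq'⟩)
      · intro _; exact List.mem_cons_self
    · simp only [List.mem_cons, or_iff_right hx]
      exact ih his'.2 hjs'.2

-- the merge of two strictly sorted lists is strictly sorted
theorem pairwise_mergeAff (cur nw : PySem.Dict String (List (String × String))) (is js : List String) :
    is.Pairwise (· < ·) → js.Pairwise (· < ·) → (mergeAff cur nw is js).Pairwise (· < ·) := by
  fun_induction mergeAff cur nw is js with
  | case1 js => intro _ h; exact h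
  | case2 i is => intro h _; exact h
  | case3 i is j js hij ih =>
    intro his hjs
    have his' := List.pairwise_cons.mp his
    refine List.pairwise_cons.mpr ⟨?_, ih his'.2 hjs⟩
    intro y hy
    rcases mem_mergeAff_sub _ _ _ _ _ hy with h1 | h1
    · exact his'.1 _ h1
    · rcases List.mem_cons.mp h1 with rfl | hm
      · exact hij
      · exact lt_trans hij ((List.pairwise_cons.mp hjs).1 _ hm)
  | case4 i is j js hij hji ih =>
    intro his hjs
    have hjs' := List.pairwise_cons.mp hjs
    refine List.pairwise_cons.mpr ⟨?_, ih his hjs'.2⟩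
    intro y hy
    rcases mem_mergeAff_sub _ _ _ _ _ hy with h1 | h1
    · rcases List.mem_cons.mp h1 with rfl | hm
      · exact hji
      · exact lt_trans hji ((List.pairwise_cons.mp his).1 _ hm)
    · exact hjs'.1 _ h1
  | case5 i is j js hij hji heq ih =>
    intro his hjs
    exact ih (List.pairwise_cons.mp his).2 (List.pairwise_cons.mp hjs).2
  | case6 i is j js hij hji heq ih =>
    intro his hjs
    obtain rfl : j = i := le_antisymm (not_lt.mp hij) (not_lt.mp hji)
    have his' := List.pairwise_cons.mp his
    have hjs' := List.pairwise_cons.mp hjs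
    refine List.pairwise_cons.mpr ⟨?_, ih his'.2 hjs'.2⟩
    intro y hy
    rcases mem_mergeAff_sub _ _ _ _ _ hy with h1 | h1
    · exact his'.1 _ h1
    · exact hjs'.1 _ h1

-- ===== VERDICT (by name: the statement is the Claim_ definition above) =====
theorem find_affected_interfaces_py_spec : Claim_equal_find_affected_interfaces_py := by
  intro current_device new_device _hdom hpre
  obtain ⟨h1, h2⟩ := hpre
  rw [PySem.Dict.contains_eq_isSome_get?] at h1 h2
  obtain ⟨cur, hcur⟩ := Option.isSome_iff_exists.mp h1
  obtain ⟨nw, hnw⟩ := Option.isSome_iff_exists.mp h2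
  unfold Spec_find_affected_interfaces_py find_affected_interfaces_py find_affected_interfaces_py_alt
  rw [hcur, hnw]
  simp only [Option.elim]
  set ck := PySem.List.sorted (PySem.Set.ofList (PySem.Dict.keys ⟨cur⟩)) (fun x => x) false with hck
  set nk := PySem.List.sorted (PySem.Set.ofList (PySem.Dict.keys ⟨nw⟩)) (fun x => x) false with hnk
  have hckp : ck.Pairwise (· < ·) := PySem.List.sorted_ofList_pairwise_lt _
  have hnkp : nk.Pairwise (· < ·) := PySem.List.sorted_ofList_pairwise_lt _
  have hmerge_p := pairwise_mergeAff ⟨cur⟩ ⟨nw⟩ ck nk hckp hnkp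
  apply PySem.List.sorted_eq_of_perm_of_pairwise_lt
  · -- permutation: same members, both Nodup
    apply (List.perm_ext_iff_of_nodup ?_ ?_).mpr
    · intro x
      rw [mem_mergeAff _ _ _ _ _ hckp hnkp, mem_foldl_addif]
      have hckm : x ∈ ck ↔ x ∈ PySem.Dict.keys (⟨cur⟩ : PySem.Dict String _) := by
        rw [hck, PySem.List.mem_sorted, PySem.Set.mem_ofList]
      have hnkm : x ∈ nk ↔ x ∈ PySem.Dict.keys (⟨nw⟩ : PySem.Dict String _) := by
        rw [hnk, PySem.List.mem_sorted, PySem.Set.mem_ofList]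
      simp only [hckm, hnkm, PySem.Set.mem_update, PySem.Set.mem_diff, PySem.Set.mem_inter,
        PySem.Set.mem_ofList, pyDictEqA_eq_pyDictEqB, Bool.not_eq_true', PySem.Set.empty,
        List.not_mem_nil, false_or]
      tauto
    · exact hmerge_p.imp ne_of_lt
    · apply nodup_foldl_addif
      exact PySem.Set.nodup_update _ _ (PySem.Set.nodup_update _ _ List.nodup_nil)
  · exact hmerge_p
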